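-- pv_equiv track=rewrite | github.com/douglundin/python-for-everyone | p4e/testbanks/testbank_dicts.py | solution
-- ===== SOURCE A (Python) =====
-- def solution(phrase):
--     """Count the letters in the phrase."""
--     rval = {}
--     for letter in phrase.lower():
--         if letter.isalpha():
--             if letter not in rval:
--                 rval[letter] = 1
--             else:
--                 rval[letter] += 1
--     return rval
-- ===== SOURCE B (Python) =====
-- def solution(phrase):
--     """Count the letters in the phrase."""
--     chars = [c for c in phrase.lower() if c.isalpha()]
--     return {c: chars.count(c) for c in dict.fromkeys(chars)}
-- ===== Notes on version B (the rewrite author's own statement) =====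
-- stated objective: alternative
-- what changed: Replaces the running-dict branch-per-character loop with a filter pass, an ordered dedup (dict.fromkeys) and a dict comprehension counting each distinct letter with list.count.
import Mathlib
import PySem

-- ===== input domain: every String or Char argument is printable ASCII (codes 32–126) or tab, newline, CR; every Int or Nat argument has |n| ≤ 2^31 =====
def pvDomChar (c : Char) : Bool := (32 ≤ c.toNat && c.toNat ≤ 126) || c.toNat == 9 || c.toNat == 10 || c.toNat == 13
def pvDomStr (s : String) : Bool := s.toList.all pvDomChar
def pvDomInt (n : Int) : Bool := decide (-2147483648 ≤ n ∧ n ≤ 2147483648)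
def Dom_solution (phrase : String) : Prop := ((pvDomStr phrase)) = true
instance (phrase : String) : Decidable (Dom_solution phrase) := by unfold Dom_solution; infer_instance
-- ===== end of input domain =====

-- B replaces A's running-dict counting loop by filter + ordered dedup + per-letter count (alternative decomposition, same cost class).

-- ===== PORT A =====
-- literal port: running dict, branch on key presence per character
def solution (phrase : String) : List (String × Int) :=
  ((PySem.Chars.lower phrase.toList).foldl
    (fun (rval : PySem.Dict String Int) letter =>
      if PySem.Chars.isalpha letter then
        let k := String.ofList [letter]
        if ¬ rval.contains k then rval.insert k 1
        else rval.insert k (rval.getD k 0 + 1)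
      else rval)
    PySem.Dict.empty).items

-- ===== PORT B =====
-- filter the lowered alphabetic chars, dedup in first-occurrence order, count each
def solution_alt (phrase : String) : List (String × Int) :=
  let chars := (PySem.Chars.lower phrase.toList).filter PySem.Chars.isalpha
  (PySem.List.dedup chars).map (fun c => (String.ofList [c], (chars.count c : Int)))

-- ===== PRECONDITION & SPEC =====
def Spec_solution (phrase : String) (out : List (String × Int)) : Prop := out = solution_alt phrase
instance (phrase : String) (out : List (String × Int)) : Decidable (Spec_solution phrase out) := by unfold Spec_solution; infer_instance

-- ===== CLAIM (what is proved, stated in full; the proofs are below) =====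
def Claim_equal_solution : Prop := ∀ (phrase : String), Dom_solution phrase → Spec_solution phrase (solution phrase)

-- ===== LEMMAS AND PROOFS =====

-- the one-char key map is injective
theorem mkOne_injective : Function.Injective (fun c : Char => String.ofList [c]) := by
  intro a b h
  simpa using congrArg String.toList h

-- A's two branches are a single insert-with-increment
theorem step_eq (d : PySem.Dict String Int) (k : String) :
    (if ¬ d.contains k then d.insert k 1 else d.insert k (d.getD k 0 + 1))
      = d.insert k (d.getD k 0 + 1) := by
  by_cases h : d.contains k
  · simp [h]
  · simp [h, PySem.Dict.getD_of_not_contains d 0 (by simpa using h)]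

-- Set.ofList commutes with mapping an injective function
theorem ofList_map {α β : Type} [DecidableEq α] [DecidableEq β]
    (f : α → β) (hf : Function.Injective f) (l : List α) (acc : List α) :
    (l.map f).foldl PySem.Set.add (acc.map f) = (l.foldl PySem.Set.add acc).map f := by
  induction l generalizing acc with
  | nil => rfl
  | cons x xs ih =>
    have hadd : PySem.Set.add (acc.map f) (f x) = (PySem.Set.add acc x).map f := by
      by_cases h : x ∈ acc
      · simp [PySem.Set.add, hf.eq_iff, h]
      · simp [PySem.Set.add, hf.eq_iff, h]
    simpa [hadd] using ih (PySem.Set.add acc x)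

theorem dedup_map_mkOne (l : List Char) :
    PySem.Set.ofList (l.map (fun c : Char => String.ofList [c]))
      = (PySem.List.dedup l).map (fun c : Char => String.ofList [c]) := by
  have := ofList_map (fun c : Char => String.ofList [c]) mkOne_injective l []
  simpa [PySem.Set.ofList_eq_foldl] using this

-- ===== VERDICT (by name: the statement is the Claim_ definition above) =====
theorem solution_spec : Claim_equal_solution := by
  intro phrase _
  unfold Spec_solution solution solution_alt
  set L := PySem.Chars.lower phrase.toList with hL
  set chars := L.filter PySem.Chars.isalpha with hchars
  have h1 : L.foldl
      (fun (rval : PySem.Dict String Int) letter =>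
        if PySem.Chars.isalpha letter then
          let k := String.ofList [letter]
          if ¬ rval.contains k then rval.insert k 1
          else rval.insert k (rval.getD k 0 + 1)
        else rval)
      PySem.Dict.empty
      = chars.foldl
          (fun (rval : PySem.Dict String Int) letter =>
            rval.insert (String.ofList [letter]) (rval.getD (String.ofList [letter]) 0 + 1))
          PySem.Dict.empty := by
    rw [PySem.List.foldl_if_eq_foldl_filter]
    exact PySem.List.foldl_congr_mem _ _ _ _ (fun acc x _ => step_eq acc (String.ofList [x]))
  have h2 : chars.foldl
      (fun (rval : PySem.Dict String Int) letter =>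
        rval.insert (String.ofList [letter]) (rval.getD (String.ofList [letter]) 0 + 1))
      PySem.Dict.empty
      = PySem.Dict.counter (chars.map (fun c => String.ofList [c])) := by
    rw [← PySem.Dict.foldl_insert_getD_add_one_eq_counter, List.foldl_map]
  rw [h1, h2, PySem.Dict.items_counter, dedup_map_mkOne, List.map_map]
  refine List.map_congr_left ?_
  intro c _
  simp [List.count_map_of_injective _ _ mkOne_injective]
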